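-- pv_equiv track=rewrite | github.com/beejh02/portfolio | korean_automaton/korean_automaton.py | eng_to_hangul
-- ===== SOURCE A (Python) =====
-- ENG_TO_HANGUL = {
--     'r': 'ㄱ', 'R': 'ㄲ', 's': 'ㄴ', 'e': 'ㄷ', 'E': 'ㄸ', 'f': 'ㄹ', 'a': 'ㅁ', 'q': 'ㅂ', 'Q': 'ㅃ', 't': 'ㅅ', 'T': 'ㅆ',
--     'd': 'ㅇ', 'w': 'ㅈ', 'W': 'ㅉ', 'c': 'ㅊ', 'z': 'ㅋ', 'x': 'ㅌ', 'v': 'ㅍ', 'g': 'ㅎ',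
--     'k': 'ㅏ', 'o': 'ㅐ', 'i': 'ㅑ', 'O': 'ㅒ', 'j': 'ㅓ', 'p': 'ㅔ', 'u': 'ㅕ', 'P': 'ㅖ',
--     'h': 'ㅗ', 'y': 'ㅛ', 'n': 'ㅜ', 'b': 'ㅠ', 'm': 'ㅡ', 'l': 'ㅣ',
--     'hk': 'ㅘ', 'ho': 'ㅙ', 'hl': 'ㅚ', 'nj': 'ㅝ', 'np': 'ㅞ', 'nl': 'ㅟ', 'ml': 'ㅢ',
--     'rt': 'ㄳ', 'sw': 'ㄵ', 'sg': 'ㄶ', 'fr': 'ㄺ', 'fa': 'ㄻ', 'fq': 'ㄼ', 'ft': 'ㄽ',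
--     'fx': 'ㄾ', 'fv': 'ㄿ', 'fg': 'ㅀ', 'qt': 'ㅄ'
-- }
--
-- def eng_to_hangul(eng_str):
--     hangul_str = ''
--     skip = 0
--     for i in range(len(eng_str)):
--         if skip > 0:
--             skip -= 1
--             continue
--         # 복합 종성 조합을 확인하고 분리하여 처리
--         if i + 1 < len(eng_str) and eng_str[i:i+2] in ENG_TO_HANGUL:
--             if eng_str[i:i+2] in ['fr', 'fa', 'fq', 'ft', 'fx', 'fv', 'fg', 'rt', 'sw', 'sg', 'qt']:
--                 # 복합 종성을 구성하는 문자 각각을 처리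
--                 hangul_str += ENG_TO_HANGUL[eng_str[i]]  # 첫 번째 문자는 종성으로 처리
--                 hangul_str += ENG_TO_HANGUL[eng_str[i + 1]]  # 두 번째 문자는 초성으로 처리
--                 skip = 1
--             else:
--                 hangul_str += ENG_TO_HANGUL[eng_str[i:i+2]]
--                 skip = 1
--         elif eng_str[i] in ENG_TO_HANGUL:
--             hangul_str += ENG_TO_HANGUL[eng_str[i]]
--         else:
--             hangul_str += eng_str[i]
--     return hangul_str
-- ===== SOURCE B (Python) =====
-- # B drops the complex-coda machinery entirely: a complex coda's output equals the
-- # concatenation of its two letters' single-jamo maps, and a coda's second letter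
-- # can never start a combined vowel, so only the 7 combined-vowel digraphs need
-- # pairing. One character-by-character fold with a one-character lookbehind
-- # replaces A's indexed loop with slices, a skip counter and the 11-key coda list.
--
-- _KEYS = "rRseEfaqQtTdwWczxvgkoiOjpuPhynbml"
-- _VALS = "ㄱㄲㄴㄷㄸㄹㅁㅂㅃㅅㅆㅇㅈㅉㅊㅋㅌㅍㅎㅏㅐㅑㅒㅓㅔㅕㅖㅗㅛㅜㅠㅡㅣ"
-- _DIGRAPHS = {'hk': 'ㅘ', 'ho': 'ㅙ', 'hl': 'ㅚ', 'nj': 'ㅝ', 'np': 'ㅞ', 'nl': 'ㅟ', 'ml': 'ㅢ'}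
--
-- def _jamo(c):
--     i = _KEYS.find(c)
--     return _VALS[i] if i >= 0 else c
--
-- def eng_to_hangul(eng_str):
--     out = []
--     pending = None
--     for c in eng_str:
--         if pending is not None and pending + c in _DIGRAPHS:
--             out.append(_DIGRAPHS[pending + c])
--             pending = None
--         else:
--             if pending is not None:
--                 out.append(_jamo(pending))
--             pending = c
--     if pending is not None:
--         out.append(_jamo(pending))
--     return ''.join(out)
-- ===== Notes on version B (the rewrite author's own statement) =====
-- stated objective: simpler
-- what changed: B drops A's complex-coda machinery (the 11-key list, slices and skip counter) entirely: a complex coda's output equals the concatenation of its two letters' single-jamo maps and a coda letter never begins a combined vowel, so B pairs only the 7 vowel digraphs, in a character-by-character fold with a one-character lookbehind and a parallel-string jamo table.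
import Mathlib
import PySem

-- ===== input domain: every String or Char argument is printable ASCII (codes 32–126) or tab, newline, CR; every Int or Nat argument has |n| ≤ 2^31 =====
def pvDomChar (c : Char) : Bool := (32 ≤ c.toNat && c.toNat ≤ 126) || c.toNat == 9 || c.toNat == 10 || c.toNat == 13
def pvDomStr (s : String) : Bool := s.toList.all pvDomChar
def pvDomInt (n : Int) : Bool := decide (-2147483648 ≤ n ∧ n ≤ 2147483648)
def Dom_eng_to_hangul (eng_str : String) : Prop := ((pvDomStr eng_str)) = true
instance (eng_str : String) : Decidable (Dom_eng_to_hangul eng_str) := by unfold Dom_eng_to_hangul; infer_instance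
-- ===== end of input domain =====

set_option maxRecDepth 100000

-- B drops the complex-coda machinery (11-key list, slices, skip counter): a coda's
-- output equals its two letters' single maps and coda letters never start a combined
-- vowel, so B pairs only the 7 vowel digraphs in a char fold with a lookbehind.

-- ===== PORT A =====
-- ENG_TO_HANGUL, keys as char lists (1- or 2-char Python string keys)
def dictA : PySem.Dict (List Char) (List Char) := PySem.Dict.ofList [
  (['r'], ['ㄱ']), (['R'], ['ㄲ']), (['s'], ['ㄴ']), (['e'], ['ㄷ']), (['E'], ['ㄸ']),
  (['f'], ['ㄹ']), (['a'], ['ㅁ']), (['q'], ['ㅂ']), (['Q'], ['ㅃ']), (['t'], ['ㅅ']),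
  (['T'], ['ㅆ']), (['d'], ['ㅇ']), (['w'], ['ㅈ']), (['W'], ['ㅉ']), (['c'], ['ㅊ']),
  (['z'], ['ㅋ']), (['x'], ['ㅌ']), (['v'], ['ㅍ']), (['g'], ['ㅎ']),
  (['k'], ['ㅏ']), (['o'], ['ㅐ']), (['i'], ['ㅑ']), (['O'], ['ㅒ']), (['j'], ['ㅓ']),
  (['p'], ['ㅔ']), (['u'], ['ㅕ']), (['P'], ['ㅖ']),
  (['h'], ['ㅗ']), (['y'], ['ㅛ']), (['n'], ['ㅜ']), (['b'], ['ㅠ']), (['m'], ['ㅡ']), (['l'], ['ㅣ']),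
  (['h','k'], ['ㅘ']), (['h','o'], ['ㅙ']), (['h','l'], ['ㅚ']), (['n','j'], ['ㅝ']),
  (['n','p'], ['ㅞ']), (['n','l'], ['ㅟ']), (['m','l'], ['ㅢ']),
  (['r','t'], ['ㄳ']), (['s','w'], ['ㄵ']), (['s','g'], ['ㄶ']), (['f','r'], ['ㄺ']),
  (['f','a'], ['ㄻ']), (['f','q'], ['ㄼ']), (['f','t'], ['ㄽ']),
  (['f','x'], ['ㄾ']), (['f','v'], ['ㄿ']), (['f','g'], ['ㅀ']), (['q','t'], ['ㅄ'])]

-- the literal list ['fr', 'fa', 'fq', 'ft', 'fx', 'fv', 'fg', 'rt', 'sw', 'sg', 'qt']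
def complexCodas : List (List Char) := [['f','r'], ['f','a'], ['f','q'], ['f','t'],
  ['f','x'], ['f','v'], ['f','g'], ['r','t'], ['s','w'], ['s','g'], ['q','t']]

-- the 'for i in range(len(eng_str))' loop with its (hangul_str, skip) state;
-- indexing eng_str[i] / eng_str[i+1] is in range on every path taken, so
-- pyGetD's default ' ' is never produced.
def engAloop (cs : List Char) (i : Nat) (hangul : List Char) (skip : Int) : List Char :=
  if i < cs.length then
    if skip > 0 then
      engAloop cs (i + 1) hangul (skip - 1)
    else
      if (i + 1 < cs.length) ∧ dictA.contains (PySem.List.slice cs (some (i : Int)) (some ((i : Int) + 2))) = true then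
        if PySem.List.slice cs (some (i : Int)) (some ((i : Int) + 2)) ∈ complexCodas then
          engAloop cs (i + 1)
            (hangul ++ dictA.getD [PySem.List.pyGetD cs (i : Int) ' '] []
                    ++ dictA.getD [PySem.List.pyGetD cs ((i : Int) + 1) ' '] []) 1
        else
          engAloop cs (i + 1)
            (hangul ++ dictA.getD (PySem.List.slice cs (some (i : Int)) (some ((i : Int) + 2))) []) 1
      else if dictA.contains [PySem.List.pyGetD cs (i : Int) ' '] = true then
        engAloop cs (i + 1) (hangul ++ dictA.getD [PySem.List.pyGetD cs (i : Int) ' '] []) skip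
      else
        engAloop cs (i + 1) (hangul ++ [PySem.List.pyGetD cs (i : Int) ' ']) skip
  else hangul
termination_by cs.length - i

def eng_to_hangul (eng_str : String) : String :=
  String.mk (engAloop eng_str.toList 0 [] 0)

-- ===== PORT B =====
-- _KEYS / _VALS: the single-jamo table as two parallel strings
def engKeys : String := "rRseEfaqQtTdwWczxvgkoiOjpuPhynbml"
def engVals : String := "ㄱㄲㄴㄷㄸㄹㅁㅂㅃㅅㅆㅇㅈㅉㅊㅋㅌㅍㅎㅏㅐㅑㅒㅓㅔㅕㅖㅗㅛㅜㅠㅡㅣ"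

-- _jamo: _KEYS.find(c) then _VALS[i]; a nonnegative find result is < len(_VALS),
-- so pyGet?'s default (Python would raise) is never produced.
def jamoB (c : Char) : Char :=
  let i := PySem.Str.find engKeys (String.mk [c])
  if i ≥ 0 then (PySem.Str.pyGet? engVals i).getD c else c

-- _DIGRAPHS: the 7 combined vowels, the only pairs B ever joins
def digraphs : PySem.Dict (List Char) Char := PySem.Dict.ofList [
  (['h','k'], 'ㅘ'), (['h','o'], 'ㅙ'), (['h','l'], 'ㅚ'), (['n','j'], 'ㅝ'),
  (['n','p'], 'ㅞ'), (['n','l'], 'ㅟ'), (['m','l'], 'ㅢ')]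

-- Source B's 'for c in eng_str' body: state = (out, pending one-character lookbehind)
def engBstep (st : List (List Char) × Option Char) (c : Char) : List (List Char) × Option Char :=
  match st with
  | (out, some p) =>
    match digraphs.get? [p, c] with
    | some j => (out ++ [[j]], none)
    | none   => (out ++ [[jamoB p]], some c)
  | (out, none) => (out, some c)

-- the final flush of pending, then ''.join(out)
def eng_to_hangul_alt (eng_str : String) : String :=
  let st := eng_str.toList.foldl engBstep ([], none)
  String.mk (match st.2 with
    | some p => (st.1 ++ [[jamoB p]]).flatten
    | none => st.1.flatten)

-- ===== PRECONDITION & SPEC =====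
def Spec_eng_to_hangul (eng_str : String) (out : String) : Prop := out = eng_to_hangul_alt eng_str
instance (eng_str : String) (out : String) : Decidable (Spec_eng_to_hangul eng_str out) := by unfold Spec_eng_to_hangul; infer_instance

-- ===== CLAIM (what is proved, stated in full; the proofs are below) =====
def Claim_equal_eng_to_hangul : Prop := ∀ (eng_str : String), Dom_eng_to_hangul eng_str → Spec_eng_to_hangul eng_str (eng_to_hangul eng_str)

-- ===== LEMMAS AND PROOFS =====

lemma dictA_keys : dictA.keys = [
  ['r'], ['R'], ['s'], ['e'], ['E'], ['f'], ['a'], ['q'], ['Q'], ['t'], ['T'], ['d'],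
  ['w'], ['W'], ['c'], ['z'], ['x'], ['v'], ['g'], ['k'], ['o'], ['i'], ['O'], ['j'],
  ['p'], ['u'], ['P'], ['h'], ['y'], ['n'], ['b'], ['m'], ['l'],
  ['h','k'], ['h','o'], ['h','l'], ['n','j'], ['n','p'], ['n','l'], ['m','l'],
  ['r','t'], ['s','w'], ['s','g'], ['f','r'], ['f','a'], ['f','q'], ['f','t'],
  ['f','x'], ['f','v'], ['f','g'], ['q','t']] := by decide

lemma digraph_keys : digraphs.keys = [['h','k'], ['h','o'], ['h','l'], ['n','j'],
  ['n','p'], ['n','l'], ['m','l']] := by decide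

lemma engKeys_list : engKeys.toList = ['r', 'R', 's', 'e', 'E', 'f', 'a', 'q', 'Q',
  't', 'T', 'd', 'w', 'W', 'c', 'z', 'x', 'v', 'g', 'k', 'o', 'i', 'O', 'j', 'p',
  'u', 'P', 'h', 'y', 'n', 'b', 'm', 'l'] := by decide

-- B's single-char map agrees with A's single-char handling
set_option maxHeartbeats 2000000 in
lemma jamoB_spec (c : Char) :
    [jamoB c] = if dictA.contains [c] = true then dictA.getD [c] [] else [c] := by
  by_cases hm : c ∈ engKeys.toList
  · rw [engKeys_list] at hm
    simp only [List.mem_cons, List.not_mem_nil, or_false] at hm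
    rcases hm with h|h|h|h|h|h|h|h|h|h|h|h|h|h|h|h|h|h|h|h|h|h|h|h|h|h|h|h|h|h|h|h|h <;>
      subst h <;> decide
  · have h1 : jamoB c = c := by
      unfold jamoB
      have hf : PySem.Str.find engKeys (String.mk [c]) = -1 := by
        rw [PySem.Str.find_eq_neg_one_iff]
        intro hinf
        have he : (String.mk [c]).toList = [c] := Eq.symm (String.ofList_eq.mp rfl)
        rw [he] at hinf
        exact hm (List.singleton_sublist.mp hinf.sublist)
      rw [hf]; norm_num
    have h2 : dictA.contains [c] = false := by
      rw [PySem.Dict.contains_eq_decide_mem_keys, decide_eq_false_iff_not, dictA_keys]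
      rw [engKeys_list] at hm
      simp only [List.mem_cons, List.not_mem_nil, or_false, not_or] at hm
      obtain ⟨a1, a2, a3, a4, a5, a6, a7, a8, a9, a10, a11, a12, a13, a14, a15, a16, a17, a18, a19, a20, a21, a22, a23, a24, a25, a26, a27, a28, a29, a30, a31, a32, a33⟩ := hm
      simp [a1, a2, a3, a4, a5, a6, a7, a8, a9, a10, a11, a12, a13, a14, a15, a16, a17, a18, a19, a20, a21, a22, a23, a24, a25, a26, a27, a28, a29, a30, a31, a32, a33]
    rw [h1, h2]; simp

-- no digraph key starts with a letter other than h, n, m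
lemma dig_first (c2 c3 : Char) (h1 : c2 ≠ 'h') (h2 : c2 ≠ 'n') (h3 : c2 ≠ 'm') :
    digraphs.get? [c2, c3] = none := by
  rw [PySem.Dict.get?_eq_none_iff_not_mem_keys, digraph_keys]
  simp [h1, h2, h3]

set_option maxHeartbeats 2000000 in
-- a complex coda: not a digraph, each letter maps singly to B's jamo, and its
-- second letter can never start a digraph
lemma codapair (c1 c2 : Char) (hcx : [c1, c2] ∈ complexCodas) :
    digraphs.get? [c1, c2] = none ∧ dictA.getD [c1] [] = [jamoB c1] ∧
      dictA.getD [c2] [] = [jamoB c2] ∧ ∀ c3, digraphs.get? [c2, c3] = none := by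
  simp only [complexCodas, List.mem_cons, List.not_mem_nil, or_false,
    List.cons.injEq, and_true] at hcx
  rcases hcx with ⟨e1,e2⟩|⟨e1,e2⟩|⟨e1,e2⟩|⟨e1,e2⟩|⟨e1,e2⟩|⟨e1,e2⟩|⟨e1,e2⟩|⟨e1,e2⟩|⟨e1,e2⟩|⟨e1,e2⟩|⟨e1,e2⟩ <;>
    subst e1 <;> subst e2 <;>
    exact ⟨by decide, by decide, by decide,
      fun c3 => dig_first _ c3 (by decide) (by decide) (by decide)⟩

set_option maxHeartbeats 2000000 in
-- a two-char ENG_TO_HANGUL key that is not a complex coda is a digraph of B's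
lemma vowelpair (c1 c2 : Char) (hc : dictA.contains [c1, c2] = true)
    (hcx : [c1, c2] ∉ complexCodas) :
    ∃ j, digraphs.get? [c1, c2] = some j ∧ dictA.getD [c1, c2] [] = [j] := by
  have hm : [c1, c2] ∈ dictA.keys := by
    rw [PySem.Dict.contains_eq_decide_mem_keys] at hc
    exact of_decide_eq_true hc
  rw [dictA_keys] at hm
  simp only [List.mem_cons, List.not_mem_nil, or_false, List.cons.injEq, and_true,
    reduceCtorEq, and_false, false_or] at hm
  rcases hm with ⟨e1,e2⟩|⟨e1,e2⟩|⟨e1,e2⟩|⟨e1,e2⟩|⟨e1,e2⟩|⟨e1,e2⟩|⟨e1,e2⟩|⟨e1,e2⟩|⟨e1,e2⟩|⟨e1,e2⟩|⟨e1,e2⟩|⟨e1,e2⟩|⟨e1,e2⟩|⟨e1,e2⟩|⟨e1,e2⟩|⟨e1,e2⟩|⟨e1,e2⟩|⟨e1,e2⟩ <;>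
    subst e1 <;> subst e2 <;>
    first
      | exact absurd (by decide) hcx
      | exact ⟨_, rfl, by decide⟩

-- a pair that is not in ENG_TO_HANGUL at all is not a digraph either
lemma nodig (c1 c2 : Char) (hc : dictA.contains [c1, c2] = false) :
    digraphs.get? [c1, c2] = none := by
  rw [PySem.Dict.get?_eq_none_iff_not_mem_keys, digraph_keys]
  intro hm
  rw [PySem.Dict.contains_eq_decide_mem_keys, decide_eq_false_iff_not, dictA_keys] at hc
  apply hc
  simp only [List.mem_cons, List.not_mem_nil, or_false] at hm
  rcases hm with h|h|h|h|h|h|h <;> rw [h] <;> decide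

-- B's fold shifts the accumulated output out front
lemma bfold_shift (cs : List Char) : ∀ (out : List (List Char)) (pend : Option Char),
    cs.foldl engBstep (out, pend) =
      (out ++ (cs.foldl engBstep ([], pend)).1, (cs.foldl engBstep ([], pend)).2) := by
  induction cs with
  | nil => intro out pend; simp [List.foldl]
  | cons c rest ih =>
    intro out pend
    match pend with
    | none =>
      simp only [List.foldl, engBstep]
      rw [ih out (some c)]
    | some p =>
      cases hg : digraphs.get? [p, c] with
      | some j =>
        simp only [List.foldl, engBstep, hg, List.nil_append]
        rw [ih (out ++ [[j]]) none, ih [[j]] none]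
        simp
      | none =>
        simp only [List.foldl, engBstep, hg, List.nil_append]
        rw [ih (out ++ [[jamoB p]]) (some c), ih [[jamoB p]] (some c)]
        simp

-- B's output from a given pending state and remaining characters
def bOut (pend : Option Char) (cs : List Char) : List (List Char) :=
  match cs.foldl engBstep ([], pend) with
  | (out, some p) => out ++ [[jamoB p]]
  | (out, none) => out

lemma bOut_none_nil : bOut none [] = [] := rfl

lemma bOut_none_cons (c : Char) (cs : List Char) :
    bOut none (c :: cs) = bOut (some c) cs := rfl

lemma bOut_some_nil (p : Char) : bOut (some p) [] = [[jamoB p]] := rfl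

lemma bOut_some_cons_dig (p c : Char) (cs : List Char) (j : Char)
    (h : digraphs.get? [p, c] = some j) :
    bOut (some p) (c :: cs) = [[j]] ++ bOut none cs := by
  unfold bOut
  simp only [List.foldl, engBstep, h, List.nil_append]
  rw [bfold_shift cs [[j]] none]
  rcases hx : cs.foldl engBstep ([], none) with ⟨o, _|q⟩ <;> simp

lemma bOut_some_cons_nodig (p c : Char) (cs : List Char)
    (h : digraphs.get? [p, c] = none) :
    bOut (some p) (c :: cs) = [[jamoB p]] ++ bOut (some c) cs := by
  unfold bOut
  simp only [List.foldl, engBstep, h, List.nil_append]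
  rw [bfold_shift cs [[jamoB p]] (some c)]
  rcases hx : cs.foldl engBstep ([], some c) with ⟨o, _|q⟩ <;> simp

-- a pending letter that can start no digraph is flushed immediately
lemma bOut_blocked (c2 : Char) (hb : ∀ c3, digraphs.get? [c2, c3] = none)
    (l : List Char) : bOut (some c2) l = [[jamoB c2]] ++ bOut none l := by
  cases l with
  | nil => rfl
  | cons c3 rest => rw [bOut_some_cons_nodig c2 c3 rest (hb c3), bOut_none_cons]

-- the Python slice eng_str[i:i+2]
lemma slice_two (cs : List Char) (i : Nat) :
    PySem.List.slice cs (some (i : Int)) (some ((i : Int) + 2)) = (cs.drop i).take 2 := by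
  have := PySem.List.slice_natCast_add (xs := cs) (j := i) (n := 2)
  exact_mod_cast this

lemma main_loop (n : Nat) : ∀ (cs : List Char) (i : Nat), cs.length - i ≤ n →
    ∀ h : List Char, engAloop cs i h 0 = h ++ (bOut none (cs.drop i)).flatten := by
  induction n with
  | zero =>
    intro cs i hn h
    rw [engAloop, if_neg (by omega : ¬ i < cs.length),
      List.drop_eq_nil_of_le (by omega)]
    simp [bOut_none_nil]
  | succ n ih =>
    intro cs i hn h
    by_cases hi : i < cs.length
    · have hc1 : cs.drop i = cs[i] :: cs.drop (i + 1) := List.drop_eq_getElem_cons hi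
      have hg1 : PySem.List.pyGetD cs (i : Int) ' ' = cs[i] :=
        PySem.List.pyGetD_ofNat cs i ' ' hi
      by_cases h2 : i + 1 < cs.length
      · have hc2 : cs.drop (i + 1) = cs[i + 1] :: cs.drop (i + 2) :=
          List.drop_eq_getElem_cons h2
        have hslice : PySem.List.slice cs (some (i : Int)) (some ((i : Int) + 2)) =
            [cs[i], cs[i + 1]] := by
          rw [slice_two, hc1, hc2]; rfl
        have hg2 : PySem.List.pyGetD cs ((i : Int) + 1) ' ' = cs[i + 1] := by
          have hcast : ((i : Int) + 1) = ((i + 1 : Nat) : Int) := by push_cast; ring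
          rw [hcast]; exact PySem.List.pyGetD_ofNat cs (i + 1) ' ' h2
        have hskip : ∀ h' : List Char, engAloop cs (i + 1) h' 1 = engAloop cs (i + 2) h' 0 := by
          intro h'
          rw [engAloop, if_pos h2, if_pos (by norm_num : (1 : Int) > 0)]
          norm_num
        by_cases hcont : dictA.contains [cs[i], cs[i + 1]] = true
        · by_cases hcx : [cs[i], cs[i + 1]] ∈ complexCodas
          · obtain ⟨hdnone, hA1, hA2, hblock⟩ := codapair cs[i] cs[i + 1] hcx
            rw [engAloop, if_pos hi, if_neg (by norm_num : ¬ (0 : Int) > 0), hslice,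
              if_pos ⟨h2, hcont⟩, if_pos hcx, hg1, hg2, hskip,
              ih cs (i + 2) (by omega)]
            rw [hc1, bOut_none_cons, hc2,
              bOut_some_cons_nodig _ _ _ hdnone, bOut_blocked _ hblock]
            simp [hA1, hA2]
          · obtain ⟨j, hdig, hval⟩ := vowelpair cs[i] cs[i + 1] hcont hcx
            rw [engAloop, if_pos hi, if_neg (by norm_num : ¬ (0 : Int) > 0), hslice,
              if_neg hcx, if_pos ⟨h2, hcont⟩, hskip, ih cs (i + 2) (by omega)]
            rw [hc1, bOut_none_cons, hc2, bOut_some_cons_dig _ _ _ j hdig]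
            simp [hval]
        · have hcf : dictA.contains [cs[i], cs[i + 1]] = false := by
            cases hcv : dictA.contains [cs[i], cs[i + 1]] with
            | false => rfl
            | true => exact absurd hcv hcont
          have hdnone := nodig cs[i] cs[i + 1] hcf
          rw [engAloop, if_pos hi, if_neg (by norm_num : ¬ (0 : Int) > 0), hslice,
            if_neg (fun hx => hcont hx.2), hg1]
          rw [hc1, bOut_none_cons, hc2, bOut_some_cons_nodig _ _ _ hdnone,
            ← bOut_none_cons, ← hc2]
          have hj := jamoB_spec cs[i]
          by_cases hsc : dictA.contains [cs[i]] = true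
          · rw [if_pos hsc] at hj
            rw [if_pos hsc, ih cs (i + 1) (by omega), ← hj]
            simp
          · rw [if_neg hsc] at hj
            rw [if_neg hsc, ih cs (i + 1) (by omega), ← hj]
            simp
      · have hc2 : cs.drop (i + 1) = [] := List.drop_eq_nil_of_le (by omega)
        have hslice : PySem.List.slice cs (some (i : Int)) (some ((i : Int) + 2)) = [cs[i]] := by
          rw [slice_two, hc1, hc2]; rfl
        rw [engAloop, if_pos hi, if_neg (by norm_num : ¬ (0 : Int) > 0), hslice,
          if_neg (by intro hx; exact absurd hx.1 h2), hg1]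
        rw [hc1, hc2, bOut_none_cons, bOut_some_nil]
        have hj := jamoB_spec cs[i]
        by_cases hsc : dictA.contains [cs[i]] = true
        · rw [if_pos hsc] at hj
          rw [if_pos hsc, ih cs (i + 1) (by omega), ← hj, hc2]
          simp [bOut_none_nil]
        · rw [if_neg hsc] at hj
          rw [if_neg hsc, ih cs (i + 1) (by omega), ← hj, hc2]
          simp [bOut_none_nil]
    · rw [engAloop, if_neg hi, List.drop_eq_nil_of_le (by omega)]
      simp [bOut_none_nil]

lemma alt_eq_bOut (s : String) :
    eng_to_hangul_alt s = String.mk (bOut none s.toList).flatten := by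
  unfold eng_to_hangul_alt bOut
  rcases hx : s.toList.foldl engBstep ([], none) with ⟨o, _|p⟩ <;> simp

-- ===== VERDICT (by name: the statement is the Claim_ definition above) =====
theorem eng_to_hangul_spec : Claim_equal_eng_to_hangul := by
  intro s _
  unfold Spec_eng_to_hangul eng_to_hangul
  rw [alt_eq_bOut, main_loop (s.toList.length) s.toList 0 (by omega) []]
  simp
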